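-- pv_equiv track=rewrite | github.com/AsserHic/arduino_vga | image/txt2array.py | collapse_pixels
-- ===== SOURCE A (Python) =====
-- from typing import Dict, List
--
-- def collapse_pixels(rows: List[List[str]],
--                     color_map: Dict[str, int]):
--     for row_original in rows:
--         row = [color_map[value] for value in row_original]
--         collapsed = []
--         for i in range(0, len(row), 4):
--             collapsed.append(sum([
--                 row[i] * 64,
--                 row[i + 1] * 16,
--                 row[i + 2] * 4,
--                 row[i + 3],
--             ]))
--         yield collapsed
-- ===== SOURCE B (Python) =====
-- def collapse_pixels(rows, color_map):
--     for row_original in rows: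
--         collapsed = []
--         acc = 0
--         n = 0
--         for value in row_original:
--             acc = acc * 4 + color_map[value]
--             n += 1
--             if n == 4:
--                 collapsed.append(acc)
--                 acc = 0
--                 n = 0
--         yield collapsed
-- ===== Notes on version B (the rewrite author's own statement) =====
-- stated objective: alternative
-- what changed: Replaces the precomputed color row plus index arithmetic over chunk starts (row[i]*64+row[i+1]*16+row[i+2]*4+row[i+3]) with a single pass over each row keeping a Horner accumulator and a 4-counter, emitting the packed byte every fourth pixel with no intermediate list and no indexing.
import Mathlib
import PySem

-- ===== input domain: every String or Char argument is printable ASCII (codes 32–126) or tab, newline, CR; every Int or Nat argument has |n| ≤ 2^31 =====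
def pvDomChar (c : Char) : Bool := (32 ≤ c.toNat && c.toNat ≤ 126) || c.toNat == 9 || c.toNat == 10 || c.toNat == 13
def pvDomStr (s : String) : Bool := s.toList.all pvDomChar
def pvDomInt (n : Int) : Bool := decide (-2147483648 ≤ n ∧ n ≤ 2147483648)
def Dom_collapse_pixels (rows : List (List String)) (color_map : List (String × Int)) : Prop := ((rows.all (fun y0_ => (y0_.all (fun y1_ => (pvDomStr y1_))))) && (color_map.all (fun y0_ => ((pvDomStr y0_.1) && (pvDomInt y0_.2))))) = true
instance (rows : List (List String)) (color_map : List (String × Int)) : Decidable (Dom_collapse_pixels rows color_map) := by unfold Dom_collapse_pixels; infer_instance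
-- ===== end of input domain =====

-- B replaces chunk-start indexing (row[i]*64 + row[i+1]*16 + row[i+2]*4 + row[i+3]) with a
-- single pass per row using a Horner accumulator and a 4-counter (alternative decomposition).


-- ===== PORT A =====
-- literal port of A: map each row through color_map (KeyError excluded by Pre_, so Dict.getD
-- is exact there), then for i in range(0, len(row), 4) append the sum of the four scaled
-- pixels (row[i..i+3] in-range under Pre_, so pyGetD is exact there); yield collects to a list
def collapse_pixels (rows : List (List String)) (color_map : List (String × Int)) : List (List Int) :=
  rows.map (fun row_original =>
    let row := row_original.map (fun value => PySem.Dict.getD (PySem.Dict.mk color_map) value 0)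
    (PySem.List.pyRange 0 (row.length : Int) 4).foldl
      (fun collapsed i =>
        collapsed ++ [([PySem.List.pyGetD row i 0 * 64,
                        PySem.List.pyGetD row (i + 1) 0 * 16,
                        PySem.List.pyGetD row (i + 2) 0 * 4,
                        PySem.List.pyGetD row (i + 3) 0]).sum])
      [])

-- ===== PORT B =====
-- literal port of B: one fold per row over (collapsed, acc, n)
def collapse_pixels_alt (rows : List (List String)) (color_map : List (String × Int)) : List (List Int) :=
  rows.map (fun row_original =>
    (row_original.foldl
      (fun (s : List Int × Int × Int) value =>
        let acc := s.2.1 * 4 + PySem.Dict.getD (PySem.Dict.mk color_map) value 0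
        let n := s.2.2 + 1
        if n == 4 then (s.1 ++ [acc], 0, 0) else (s.1, acc, n))
      ([], 0, 0)).1)

-- ===== PRECONDITION & SPEC =====
-- Pre_: exactly where Python A returns: every pixel value is a key of color_map (else KeyError)
-- and every row's length is a multiple of 4 (else IndexError at row[i+1..i+3])
def Pre_collapse_pixels (rows : List (List String)) (color_map : List (String × Int)) : Prop :=
  (rows.all (fun row => (row.length % 4 == 0) &&
      row.all (fun value => PySem.Dict.contains (PySem.Dict.mk color_map) value))) = true
instance (rows : List (List String)) (color_map : List (String × Int)) : Decidable (Pre_collapse_pixels rows color_map) := by unfold Pre_collapse_pixels; infer_instance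
def pvWitness_collapse_pixels : List (List String) × (List (String × Int)) :=
  ([["r", "g", "b", "r"]], [("r", 1), ("g", 2), ("b", 3)])

def Spec_collapse_pixels (rows : List (List String)) (color_map : List (String × Int)) (out : List (List Int)) : Prop := out = collapse_pixels_alt rows color_map
instance (rows : List (List String)) (color_map : List (String × Int)) (out : List (List Int)) : Decidable (Spec_collapse_pixels rows color_map out) := by unfold Spec_collapse_pixels; infer_instance

-- ===== CLAIM (what is proved, stated in full; the proofs are below) =====
def Claim_equal_collapse_pixels : Prop := ∀ (rows : List (List String)) (color_map : List (String × Int)), Dom_collapse_pixels rows color_map → Pre_collapse_pixels rows color_map → Spec_collapse_pixels rows color_map (collapse_pixels rows color_map)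

-- ===== LEMMAS AND PROOFS =====

-- the packed value of a row whose length is a multiple of 4, chunk by chunk
def pvPack : List Int → List Int
  | a :: b :: c :: d :: rest => (a * 64 + b * 16 + c * 4 + d) :: pvPack rest
  | _ => []

-- B's per-row fold, with the color lookup inlined exactly as in the port
lemma pvFoldB (m : PySem.Dict String Int) (k : ℕ) : ∀ (xs : List String) (out : List Int),
    xs.length = 4 * k →
    (xs.foldl
      (fun (s : List Int × Int × Int) value =>
        let acc := s.2.1 * 4 + PySem.Dict.getD m value 0
        let n := s.2.2 + 1
        if n == 4 then (s.1 ++ [acc], 0, 0) else (s.1, acc, n))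
      (out, 0, 0)).1 = out ++ pvPack (xs.map (fun value => PySem.Dict.getD m value 0)) := by
  induction k with
  | zero =>
      intro xs out h
      rw [List.length_eq_zero_iff.mp h]
      simp [pvPack]
  | succ k ih =>
      intro xs out h
      match xs with
      | a :: b :: c :: d :: rest =>
        have hr : rest.length = 4 * k := by simp at h; omega
        have ih' := ih rest (out ++ [((PySem.Dict.getD m a 0 * 4 + PySem.Dict.getD m b 0) * 4
            + PySem.Dict.getD m c 0) * 4 + PySem.Dict.getD m d 0]) hr
        simp only [List.foldl]
        norm_num
        norm_num at ih'
        rw [ih']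
        have e : ((PySem.Dict.getD m a 0 * 4 + PySem.Dict.getD m b 0) * 4
            + PySem.Dict.getD m c 0) * 4 + PySem.Dict.getD m d 0
            = PySem.Dict.getD m a 0 * 64 + PySem.Dict.getD m b 0 * 16
            + PySem.Dict.getD m c 0 * 4 + PySem.Dict.getD m d 0 := by ring
        rw [e]
        simp [pvPack]

lemma pvFoldA (k : ℕ) : ∀ (xs : List Int), xs.length = 4 * k →
    (List.range k).map (fun j => xs.getD (4 * j) 0 * 64 + xs.getD (4 * j + 1) 0 * 16 +
        xs.getD (4 * j + 2) 0 * 4 + xs.getD (4 * j + 3) 0) = pvPack xs := by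
  induction k with
  | zero =>
      intro xs h
      rw [List.length_eq_zero_iff.mp h]
      simp [pvPack]
  | succ k ih =>
      intro xs h
      match xs with
      | a :: b :: c :: d :: rest =>
        have hr : rest.length = 4 * k := by simp at h; omega
        rw [List.range_succ_eq_map]
        simp only [List.map_cons, List.map_map]
        have hhead : (a :: b :: c :: d :: rest).getD 0 0 * 64
            + (a :: b :: c :: d :: rest).getD (4 * 0 + 1) 0 * 16
            + (a :: b :: c :: d :: rest).getD (4 * 0 + 2) 0 * 4
            + (a :: b :: c :: d :: rest).getD (4 * 0 + 3) 0
            = a * 64 + b * 16 + c * 4 + d := by simp [List.getD]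
        have htail : (List.range k).map
            ((fun j => (a :: b :: c :: d :: rest).getD (4 * j) 0 * 64
                + (a :: b :: c :: d :: rest).getD (4 * j + 1) 0 * 16
                + (a :: b :: c :: d :: rest).getD (4 * j + 2) 0 * 4
                + (a :: b :: c :: d :: rest).getD (4 * j + 3) 0) ∘ Nat.succ)
            = pvPack rest := by
          rw [← ih rest hr]
          apply List.map_congr_left
          intro j hj
          simp only [Function.comp, Nat.succ_eq_add_one]
          rw [show 4 * (j + 1) = 4 * j + 1 + 1 + 1 + 1 from by ring]
          rw [show 4 * j + 1 + 1 + 1 + 1 + 2 = 4 * j + 2 + 1 + 1 + 1 + 1 from by ring,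
              show 4 * j + 1 + 1 + 1 + 1 + 3 = 4 * j + 3 + 1 + 1 + 1 + 1 from by ring]
          simp
        rw [htail]
        simp only [Nat.mul_zero] at hhead ⊢
        rw [hhead]
        simp [pvPack]

lemma pvRowA (xs : List Int) (k : ℕ) (h : xs.length = 4 * k) :
    (PySem.List.pyRange 0 (xs.length : Int) 4).foldl
      (fun collapsed i =>
        collapsed ++ [([PySem.List.pyGetD xs i 0 * 64,
                        PySem.List.pyGetD xs (i + 1) 0 * 16,
                        PySem.List.pyGetD xs (i + 2) 0 * 4,
                        PySem.List.pyGetD xs (i + 3) 0]).sum])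
      [] = pvPack xs := by
  rw [PySem.List.foldl_append_singleton_eq_map]
  rw [PySem.List.pyRange_of_pos 0 (xs.length : Int) (by norm_num)]
  have hc : (if (0 : Int) < (xs.length : Int)
      then (((xs.length : Int) - 0 + 4 - 1) / 4).toNat else 0) = k := by
    rw [h]; push_cast; split_ifs <;> omega
  rw [hc, List.map_map]
  rw [← pvFoldA k xs h]
  apply List.map_congr_left
  intro j hj
  simp only [Function.comp]
  have e0 : (0 : Int) + 4 * (j : Int) = ((4 * j : ℕ) : Int) := by push_cast; ring
  have e1 : (0 : Int) + 4 * (j : Int) + 1 = ((4 * j + 1 : ℕ) : Int) := by push_cast; ring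
  have e2 : (0 : Int) + 4 * (j : Int) + 2 = ((4 * j + 2 : ℕ) : Int) := by push_cast; ring
  have e3 : (0 : Int) + 4 * (j : Int) + 3 = ((4 * j + 3 : ℕ) : Int) := by push_cast; ring
  rw [e1, e2, e3, e0]
  simp only [List.sum_cons, List.sum_nil, add_zero, PySem.List.pyGetD_natCast,
    List.getD_eq_getElem?_getD]
  ring

-- ===== VERDICT (by name: the statement is the Claim_ definition above) =====
theorem collapse_pixels_spec : Claim_equal_collapse_pixels := by
  intro rows color_map _ hpre
  unfold Spec_collapse_pixels collapse_pixels collapse_pixels_alt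
  apply List.map_congr_left
  intro row hrow
  simp only [Pre_collapse_pixels, List.all_eq_true, Bool.and_eq_true, beq_iff_eq] at hpre
  have hlen : row.length % 4 = 0 := (hpre row hrow).1
  have hk : row.length = 4 * (row.length / 4) := by omega
  have hmlen : (row.map (fun value =>
      PySem.Dict.getD (PySem.Dict.mk color_map) value 0)).length = 4 * (row.length / 4) := by
    simpa using hk
  rw [pvRowA _ (row.length / 4) hmlen]
  rw [pvFoldB (PySem.Dict.mk color_map) (row.length / 4) row [] hk]
  simp
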